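-- pv_equiv track=rewrite | github.com/ksulam/mcb185_homework | 64profinder.py | profinder
-- ===== SOURCE A (Python) =====
-- def profinder(seq, mini):
-- 	proteins = []
-- 	aalist = seq.split('*')
-- 	aalist.pop()
-- 	for aas in aalist:#splitting proteins based on stop codon
-- 		start = aas.find('M')
-- 		if aas and len(aas[start:]) >= mini and start >= 0:
-- 			proteins.append(aas[start:])
--
-- 	return proteins
-- ===== SOURCE B (Python) =====
-- def profinder(seq, mini):
--     # One-pass state machine over the characters: no split, no find, no slicing.
--     proteins = []
--     cur = None  # growing protein from the first 'M' of the current segment, else None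
--     for c in seq:
--         if c == '*':
--             if cur is not None and len(cur) >= mini:
--                 proteins.append(cur)
--             cur = None
--         elif cur is not None:
--             cur += c
--         elif c == 'M':
--             cur = 'M'
--     return proteins
-- ===== Notes on version B (the rewrite author's own statement) =====
-- stated objective: alternative
-- what changed: Replaced split('*')+pop+find+slice with a single-pass character state machine that grows the current protein from the first 'M' of each segment and flushes it at each stop codon, discarding the unterminated tail by never flushing at end of input.
import Mathlib
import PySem

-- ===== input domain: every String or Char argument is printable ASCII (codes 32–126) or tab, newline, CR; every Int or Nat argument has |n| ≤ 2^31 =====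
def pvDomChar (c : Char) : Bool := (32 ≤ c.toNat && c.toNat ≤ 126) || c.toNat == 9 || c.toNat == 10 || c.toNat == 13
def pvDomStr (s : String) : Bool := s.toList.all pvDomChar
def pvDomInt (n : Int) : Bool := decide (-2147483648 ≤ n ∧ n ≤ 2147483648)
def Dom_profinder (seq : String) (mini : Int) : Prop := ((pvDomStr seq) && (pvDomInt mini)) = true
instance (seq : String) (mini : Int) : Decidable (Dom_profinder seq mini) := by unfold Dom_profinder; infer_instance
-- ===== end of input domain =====

-- B replaces A's split('*')/pop/find/slice pipeline by a single-pass character state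
-- machine (alternative decomposition, same asymptotic cost); return values agree on all inputs.

-- ===== PORT A =====
-- A: split on '*', discard the last (unterminated) segment, and for each remaining
-- segment append its suffix from the first 'M' when that suffix is long enough.
def profinder (seq : String) (mini : Int) : List String :=
  match PySem.Str.split? seq "*" with
  | none => []        -- unreachable: the separator "*" is nonempty
  | some aalist =>
    match PySem.List.pop? aalist with
    | none => []      -- unreachable: str.split always returns a nonempty list
    | some (_, rest) =>
      rest.foldl (fun proteins aas =>
        let start := PySem.Str.find aas "M"
        if aas ≠ "" ∧ mini ≤ PySem.Str.len (PySem.Str.slice aas (some start) none) ∧ 0 ≤ start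
        then proteins ++ [PySem.Str.slice aas (some start) none]
        else proteins) []

-- ===== PORT B =====
-- one step of B's loop body: state = (proteins so far, current protein from the first
-- 'M' of the current segment, or none)
def pvStep (mini : Int) (st : List String × Option (List Char)) (c : Char) :
    List String × Option (List Char) :=
  if c = '*' then
    match st.2 with
    | some cur => if mini ≤ (cur.length : Int) then (st.1 ++ [String.ofList cur], none)
                  else (st.1, none)
    | none => (st.1, none)
  else
    match st.2 with
    | some cur => (st.1, some (cur ++ [c]))
    | none => if c = 'M' then (st.1, some ['M']) else (st.1, none)

def profinder_alt (seq : String) (mini : Int) : List String :=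
  (seq.toList.foldl (pvStep mini) ([], none)).1

-- ===== PRECONDITION & SPEC =====
def Spec_profinder (seq : String) (mini : Int) (out : List String) : Prop := out = profinder_alt seq mini
instance (seq : String) (mini : Int) (out : List String) : Decidable (Spec_profinder seq mini out) := by unfold Spec_profinder; infer_instance

-- ===== CLAIM (what is proved, stated in full; the proofs are below) =====
def Claim_equal_profinder : Prop := ∀ (seq : String) (mini : Int), Dom_profinder seq mini → Spec_profinder seq mini (profinder seq mini)

-- ===== LEMMAS AND PROOFS =====

-- structural description of seq.split('*') on the char level
def pvSplitStar : List Char → List (List Char)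
  | [] => [[]]
  | c :: rest => if c = '*' then [] :: pvSplitStar rest
                 else (pvSplitStar rest).modifyHead (fun x => c :: x)

lemma pvSplitStar_ne_nil (cs : List Char) : pvSplitStar cs ≠ [] := by
  cases cs with
  | nil => simp [pvSplitStar]
  | cons c rest =>
    simp only [pvSplitStar]
    split
    · simp
    · have := pvSplitStar_ne_nil rest
      cases h : pvSplitStar rest with
      | nil => exact absurd h this
      | cons a t => simp

lemma pvGo_spec (l : List Char) (fuel : Nat) (cur : List Char) (acc : List (List Char))
    (hf : l.length ≤ fuel) :
    PySem.Chars.splitOn.go ['*'] fuel l cur acc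
      = acc.reverse ++ (pvSplitStar l).modifyHead (fun x => cur.reverse ++ x) := by
  induction l generalizing fuel cur acc with
  | nil =>
    cases fuel with
    | zero => rw [PySem.Chars.splitOn.go]; simp [pvSplitStar]
    | succ f => rw [PySem.Chars.splitOn.go]; simp [pvSplitStar]; omega
  | cons c rest ih =>
    cases fuel with
    | zero => simp at hf
    | succ f =>
      rw [PySem.Chars.splitOn.go]
      by_cases hc : c = '*'
      · subst hc
        rw [if_pos (by simp [List.isPrefixOf])]
        have hdrop1 : List.drop (['*'].length) ('*' :: rest) = rest := by simp
        rw [hdrop1, ih f [] (cur.reverse :: acc) (by simpa using Nat.le_of_succ_le_succ hf)]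
        simp only [pvSplitStar]
        cases pvSplitStar rest <;> simp
      · rw [if_neg (by simp [List.isPrefixOf]; exact fun h => hc h.symm)]
        rw [ih f (c :: cur) acc (by simpa using Nat.le_of_succ_le_succ hf)]
        simp only [pvSplitStar, if_neg hc]
        cases h : pvSplitStar rest with
        | nil => exact absurd h (pvSplitStar_ne_nil rest)
        | cons a t => simp

lemma pvSplitOn_eq (cs : List Char) :
    PySem.Chars.splitOn cs ['*'] = pvSplitStar cs := by
  show PySem.Chars.splitOn.go ['*'] (cs.length + 1) cs [] [] = _
  rw [pvGo_spec cs (cs.length + 1) [] [] (by omega)]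
  cases h : pvSplitStar cs with
  | nil => exact absurd h (pvSplitStar_ne_nil cs)
  | cons a t => simp

-- the current-protein value after scanning one '*'-free segment
def pvEmit (m : Option (List Char)) (a : List Char) : Option (List Char) :=
  match m with
  | some cur => some (cur ++ a)
  | none => if 'M' ∈ a then some (a.dropWhile (· ≠ 'M')) else none

def pvFlush (mini : Int) : Option (List Char) → List String
  | some cur => if mini ≤ (cur.length : Int) then [String.ofList cur] else []
  | none => []

-- what B emits over a list of segments (the last one is unterminated: never flushed)
def pvOutSegs (mini : Int) (m : Option (List Char)) : List (List Char) → List String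
  | [] => []
  | [_] => []
  | a :: b :: rest => pvFlush mini (pvEmit m a) ++ pvOutSegs mini none (b :: rest)

lemma pvEmit_nil (m : Option (List Char)) : pvEmit m [] = m := by
  cases m <;> simp [pvEmit]

lemma pvEmit_cons (m : Option (List Char)) (c : Char) (s : List Char) (hc : c ≠ '*') :
    pvEmit m (c :: s)
      = pvEmit (match m with
                | some cur => some (cur ++ [c])
                | none => if c = 'M' then some ['M'] else none) s := by
  cases m with
  | some cur => simp [pvEmit]
  | none =>
    by_cases hM : c = 'M'
    · subst hM
      simp [pvEmit, List.dropWhile]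
    · simp [pvEmit, List.dropWhile, hM, Ne.symm hM]

lemma pvStep_fst_star (mini : Int) (acc : List String) (m : Option (List Char)) :
    pvStep mini (acc, m) '*' = (acc ++ pvFlush mini m, none) := by
  cases m with
  | some cur => by_cases h : mini ≤ (cur.length : Int) <;> simp [pvStep, pvFlush, h]
  | none => simp [pvStep, pvFlush]

lemma pvB_scan (mini : Int) (cs : List Char) (acc : List String) (m : Option (List Char)) :
    (cs.foldl (pvStep mini) (acc, m)).1 = acc ++ pvOutSegs mini m (pvSplitStar cs) := by
  induction cs generalizing acc m with
  | nil => simp [pvSplitStar, pvOutSegs]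
  | cons c rest ih =>
    by_cases hc : c = '*'
    · subst hc
      rw [List.foldl_cons, pvStep_fst_star, ih]
      obtain ⟨b, r, hbr⟩ : ∃ b r, pvSplitStar rest = b :: r := by
        cases h : pvSplitStar rest with
        | nil => exact absurd h (pvSplitStar_ne_nil rest)
        | cons b r => exact ⟨b, r, rfl⟩
      simp [pvSplitStar, hbr, pvOutSegs, pvEmit_nil]
    · have hstep : pvStep mini (acc, m) c
          = (acc, match m with
                  | some cur => some (cur ++ [c])
                  | none => if c = 'M' then some ['M'] else none) := by
        cases m with
        | some cur => simp [pvStep, hc]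
        | none => by_cases hM : c = 'M' <;> simp [pvStep, hc, hM]
      rw [List.foldl_cons, hstep, ih]
      obtain ⟨s, r, hsr⟩ : ∃ s r, pvSplitStar rest = s :: r := by
        cases h : pvSplitStar rest with
        | nil => exact absurd h (pvSplitStar_ne_nil rest)
        | cons s r => exact ⟨s, r, rfl⟩
      cases r with
      | nil => simp [pvSplitStar, if_neg hc, hsr, pvOutSegs]
      | cons b r' =>
        simp only [pvSplitStar, if_neg hc, hsr, List.modifyHead, pvOutSegs]
        rw [pvEmit_cons m c s hc]

-- first-occurrence characterisation: dropWhile to the first 'M' is drop at find's index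
lemma pvDropWhile_eq_drop (a : List Char) (k : Nat)
    (h1 : ['M'] <+: a.drop k) (h2 : ∀ i, i < k → ¬ ['M'] <+: a.drop i) :
    a.dropWhile (· ≠ 'M') = a.drop k := by
  induction a generalizing k with
  | nil => simp at h1
  | cons c t ih =>
    cases k with
    | zero =>
      have hc : c = 'M' := by
        rcases h1 with ⟨u, hu⟩
        simpa using congrArg (List.head? ·) hu.symm
      subst hc
      simp
    | succ j =>
      have hc : c ≠ 'M' := by
        intro hc; subst hc
        exact h2 0 (Nat.succ_pos j) ⟨t, by simp⟩
      rw [List.drop_succ_cons] at h1 ⊢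
      rw [List.dropWhile_cons, if_pos (by simp [hc])]
      exact ih j h1 (fun i hi => by
        have := h2 (i + 1) (by omega)
        simpa using this)

-- per-segment agreement between A's find/slice test and B's emit/flush
lemma pvSeg_eq (mini : Int) (aas : String) :
    (if aas ≠ "" ∧ mini ≤ PySem.Str.len (PySem.Str.slice aas (some (PySem.Str.find aas "M")) none) ∧ 0 ≤ PySem.Str.find aas "M"
     then [PySem.Str.slice aas (some (PySem.Str.find aas "M")) none] else [])
      = pvFlush mini (pvEmit none aas.toList) := by
  have hM : ("M" : String).toList = ['M'] := by decide
  by_cases hmem : 'M' ∈ aas.toList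
  · have hinf : ['M'] <:+: aas.toList := (List.singleton_infix_iff 'M' aas.toList).mpr hmem
    have hpos : 0 ≤ PySem.Str.find aas "M" := by
      rw [PySem.Str.find_eq, hM]
      exact (PySem.Chars.find_nonneg_iff _ _).mpr hinf
    have hposC : 0 ≤ PySem.Chars.find aas.toList ['M'] := by
      rw [PySem.Str.find_eq, hM] at hpos; exact hpos
    obtain ⟨hpre, hmin⟩ := PySem.Chars.find_spec hposC
    have hdrop : aas.toList.dropWhile (· ≠ 'M')
        = aas.toList.drop (PySem.Chars.find aas.toList ['M']).toNat :=
      pvDropWhile_eq_drop _ _ hpre hmin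
    have hslice : (PySem.Str.slice aas (some (PySem.Str.find aas "M")) none).toList
        = aas.toList.dropWhile (· ≠ 'M') := by
      rw [PySem.Str.toList_slice, PySem.Str.find_eq, hM]
      show PySem.List.slice _ _ _ = _
      rw [PySem.List.slice_from _ hposC, hdrop]
    have hne : aas ≠ "" := by
      intro h; subst h; simp at hmem
    have hval : PySem.Str.slice aas (some (PySem.Str.find aas "M")) none
        = String.ofList (aas.toList.dropWhile (· ≠ 'M')) := by
      have := congrArg String.ofList hslice
      simpa using this
    have hlen : PySem.Str.len (PySem.Str.slice aas (some (PySem.Str.find aas "M")) none)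
        = ((aas.toList.dropWhile (· ≠ 'M')).length : Int) := by
      rw [PySem.Str.len_eq, hslice]
    have hcond : (aas ≠ "" ∧ mini ≤ PySem.Str.len (PySem.Str.slice aas (some (PySem.Str.find aas "M")) none) ∧ 0 ≤ PySem.Str.find aas "M")
        ↔ mini ≤ ((aas.toList.dropWhile (· ≠ 'M')).length : Int) := by
      rw [hlen]
      exact ⟨fun h => h.2.1, fun h => ⟨hne, h, hpos⟩⟩
    rw [if_congr hcond (by rw [hval]) rfl]
    simp only [pvEmit, if_pos hmem, pvFlush]
  · have hneg : ¬ 0 ≤ PySem.Str.find aas "M" := by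
      rw [PySem.Str.find_eq, hM]
      intro h
      exact hmem ((List.singleton_infix_iff 'M' aas.toList).mp
        ((PySem.Chars.find_nonneg_iff _ _).mp h))
    rw [if_neg (by tauto)]
    simp [pvEmit, hmem, pvFlush]

-- A's fold over the kept segments equals B's per-segment output
lemma pvFlatMap_eq_outSegs (mini : Int) (segs : List (List Char)) :
    segs.dropLast.flatMap (fun a => pvFlush mini (pvEmit none a))
      = pvOutSegs mini none segs := by
  induction segs with
  | nil => simp [pvOutSegs]
  | cons a t ih =>
    cases t with
    | nil => simp [pvOutSegs]
    | cons b r =>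
      rw [List.dropLast_cons₂, List.flatMap_cons, ih]
      rfl

-- ===== VERDICT (by name: the statement is the Claim_ definition above) =====
theorem profinder_spec : Claim_equal_profinder := by
  intro seq mini _hdom
  unfold Spec_profinder
  have hstar : ("*" : String).toList = ['*'] := by decide
  -- A's split as pvSplitStar
  have hsplit : PySem.Str.split? seq "*"
      = some ((PySem.Chars.splitOn seq.toList ['*']).map String.ofList) := by
    have h := PySem.Str.split?_map seq "*"
    rw [hstar] at h
    simp only [PySem.Chars.split?, List.isEmpty_cons] at h
    cases hcase : PySem.Str.split? seq "*" with
    | none => rw [hcase] at h; simp at h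
    | some ss =>
      rw [hcase] at h
      have h' : ss.map String.toList = PySem.Chars.splitOn seq.toList ['*'] := by
        simpa using h
      congr 1
      rw [← h', List.map_map]
      have : (String.ofList ∘ String.toList) = id := by
        funext t; exact String.ofList_toList
      rw [this, List.map_id]
  rw [profinder, hsplit, pvSplitOn_eq]
  -- discard the last segment via pop?
  obtain ⟨init, lastv, hconc⟩ :
      ∃ init lastv, (pvSplitStar seq.toList).map String.ofList = init ++ [lastv] := by
    rcases (pvSplitStar seq.toList).map String.ofList |>.eq_nil_or_concat with h | ⟨i, l, h⟩
    · exfalso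
      have := pvSplitStar_ne_nil seq.toList
      simp [List.map_eq_nil_iff] at h
      exact this h
    · exact ⟨i, l, by simpa [List.concat_eq_append] using h⟩
  rw [hconc]
  simp only [PySem.List.pop?_last]
  -- turn A's conditional-append fold into a flatMap
  have hfold : ∀ (l : List String),
      l.foldl (fun proteins aas =>
        let start := PySem.Str.find aas "M"
        if aas ≠ "" ∧ mini ≤ PySem.Str.len (PySem.Str.slice aas (some start) none) ∧ 0 ≤ start
        then proteins ++ [PySem.Str.slice aas (some start) none]
        else proteins) []
      = l.flatMap (fun aas => pvFlush mini (pvEmit none aas.toList)) := by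
    intro l
    have hfun : (fun (proteins : List String) (aas : String) =>
        let start := PySem.Str.find aas "M"
        if aas ≠ "" ∧ mini ≤ PySem.Str.len (PySem.Str.slice aas (some start) none) ∧ 0 ≤ start
        then proteins ++ [PySem.Str.slice aas (some start) none]
        else proteins)
        = (fun proteins aas => proteins ++ pvFlush mini (pvEmit none aas.toList)) := by
      funext proteins aas
      rw [← pvSeg_eq mini aas]
      simp only []
      split <;> simp
    rw [hfun, PySem.List.foldl_append_eq_flatMap]
    simp
  rw [hfold]
  -- identify init with the char-level dropLast
  have hinit : init = ((pvSplitStar seq.toList).dropLast).map String.ofList := by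
    have h1 : ((pvSplitStar seq.toList).map String.ofList).dropLast = init := by
      rw [hconc]; simp
    rw [← h1, ← List.map_dropLast]
  -- B's scan
  rw [profinder_alt, pvB_scan]
  rw [hinit, List.flatMap_map, ← pvFlatMap_eq_outSegs]
  have : ∀ a ∈ (pvSplitStar seq.toList).dropLast,
      pvFlush mini (pvEmit none (String.ofList a).toList) = pvFlush mini (pvEmit none a) := by
    intro a _
    simp
  rw [List.flatMap_congr (by intro a ha; exact this a ha)]
  simp
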